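-- pv_equiv track=rewrite | github.com/nnatchy/Python-2021-1 | grader homework/09/09_NestedList_★★★_Fill_In_Numbers.py | pattern6
-- ===== SOURCE A (Python) =====
-- def pattern6(N):
--     num = 1
--     final = [[0 for i in range(N)] for j in range(N)]
--     rnd = 0
--     gap = 0
--     for ind in range(N):
--         if ind % 2 == 0:  # ind = 2
--             for j in range(N-ind):  # 4-2 = 2
--                 if ind == 0:
--                     final[j][j] = num
--                     num += 1
--                 elif ind > 0:
--                     final[j][j+gap] = num
--                     num += 1
--         elif ind % 2 == 1:
--             for j in range(N-ind, 0, -1):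
--                 final[j-1][j+gap-1] = num
--                 num += 1
--         gap += 1
--     return final
-- ===== SOURCE B (Python) =====
-- def pattern6(N):
--     def cell(i, j):
--         if j < i:
--             return 0
--         d = j - i
--         s = d * N - d * (d - 1) // 2
--         return s + i + 1 if d % 2 == 0 else s + N - d - i
--     return [[cell(i, j) for j in range(N)] for i in range(N)]
-- ===== Notes on version B (the rewrite author's own statement) =====
-- stated objective: alternative
-- what changed: A walks each diagonal with a running counter and in-place assignments (top-down on even diagonals, bottom-up on odd ones); B builds the matrix cell by cell from a closed-form formula (the triangular-number count of earlier diagonals plus a parity-dependent offset), with no counter and no mutation.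
import Mathlib
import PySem

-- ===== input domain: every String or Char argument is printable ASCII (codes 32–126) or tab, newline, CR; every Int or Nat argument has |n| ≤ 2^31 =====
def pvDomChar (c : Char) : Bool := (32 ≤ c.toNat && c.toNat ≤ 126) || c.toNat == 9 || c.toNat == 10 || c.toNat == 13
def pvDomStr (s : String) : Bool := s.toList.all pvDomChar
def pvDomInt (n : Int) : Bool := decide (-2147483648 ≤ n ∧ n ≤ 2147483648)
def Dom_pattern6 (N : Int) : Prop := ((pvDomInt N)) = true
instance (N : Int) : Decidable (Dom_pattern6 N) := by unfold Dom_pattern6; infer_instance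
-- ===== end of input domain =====

-- B replaces A's diagonal walk with a running counter by a per-cell closed-form formula (objective: alternative decomposition).

-- ===== PORT A =====
-- `m[r][c] = v`: indices are always nonnegative and in range in A's loops, so pySetD is exact here.
def pvSetCell (m : List (List Int)) (r c : Int) (v : Int) : List (List Int) :=
  PySem.List.pySetD m r (PySem.List.pySetD (PySem.List.pyGetD m r []) c v)

-- body of the inner even-diagonal loop (`for j in range(N-ind)`)
def pvA_even (ind gap : Int) (p : Int × List (List Int)) (j : Int) : Int × List (List Int) :=
  if ind = 0 then (p.1 + 1, pvSetCell p.2 j j p.1)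
  else if ind > 0 then (p.1 + 1, pvSetCell p.2 j (j + gap) p.1)
  else p

-- body of the inner odd-diagonal loop (`for j in range(N-ind, 0, -1)`)
def pvA_odd (gap : Int) (p : Int × List (List Int)) (j : Int) : Int × List (List Int) :=
  (p.1 + 1, pvSetCell p.2 (j - 1) (j + gap - 1) p.1)

-- body of the outer loop over `ind`; state = (num, final, gap)
def pvA_outer (N : Int) (st : Int × List (List Int) × Int) (ind : Int) : Int × List (List Int) × Int :=
  if PySem.Int.mod ind 2 = 0 then
    let p := (PySem.List.pyRange 0 (N - ind) 1).foldl (pvA_even ind st.2.2) (st.1, st.2.1)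
    (p.1, p.2, st.2.2 + 1)
  else
    let p := (PySem.List.pyRange (N - ind) 0 (-1)).foldl (pvA_odd st.2.2) (st.1, st.2.1)
    (p.1, p.2, st.2.2 + 1)

def pattern6 (N : Int) : List (List Int) :=
  let final0 : List (List Int) :=
    (PySem.List.pyRange 0 N 1).map (fun _ => (PySem.List.pyRange 0 N 1).map (fun _ => (0 : Int)))
  (((PySem.List.pyRange 0 N 1).foldl (pvA_outer N) (1, final0, 0)).2.1)

-- ===== PORT B =====
-- port of Source B's helper `cell(i, j)`
def pvCell (N i j : Int) : Int :=
  if j < i then 0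
  else
    let d := j - i
    let s := d * N - PySem.Int.floordiv (d * (d - 1)) 2
    if PySem.Int.mod d 2 = 0 then s + i + 1 else s + N - d - i

def pattern6_alt (N : Int) : List (List Int) :=
  (PySem.List.pyRange 0 N 1).map (fun i => (PySem.List.pyRange 0 N 1).map (fun j => pvCell N i j))

-- ===== PRECONDITION & SPEC =====
def Spec_pattern6 (N : Int) (out : List (List Int)) : Prop := out = pattern6_alt N
instance (N : Int) (out : List (List Int)) : Decidable (Spec_pattern6 N out) := by unfold Spec_pattern6; infer_instance

-- ===== CLAIM (what is proved, stated in full; the proofs are below) =====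
def Claim_equal_pattern6 : Prop := ∀ (N : Int), Dom_pattern6 N → Spec_pattern6 N (pattern6 N)

-- ===== LEMMAS AND PROOFS =====

-- the matrix whose (i,j) entry is `pvCell N i j` where p holds and 0 elsewhere
def pvMat (N : Int) (p : Int → Int → Bool) : List (List Int) :=
  (PySem.List.pyRange 0 N 1).map (fun i => (PySem.List.pyRange 0 N 1).map (fun j => if p i j then pvCell N i j else 0))

-- number of cells on diagonals 0..d-1, = value of `num` minus 1 when diagonal d starts
def pvStart (N d : Int) : Int := d * N - PySem.Int.floordiv (d * (d - 1)) 2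

theorem pvStart_zero (N : Int) : pvStart N 0 = 0 := by
  unfold pvStart
  rw [PySem.Int.floordiv_eq_ediv_of_pos (by omega)]
  omega

theorem pvStart_succ (N d : Int) (hd : 0 ≤ d) :
    pvStart N (d + 1) = pvStart N d + (N - d) := by
  unfold pvStart
  rw [PySem.Int.floordiv_eq_ediv_of_pos (by omega), PySem.Int.floordiv_eq_ediv_of_pos (by omega)]
  have h1 : (d + 1) * N = d * N + N := by ring
  have h2 : (d + 1) * (d + 1 - 1) = d * (d - 1) + 2 * d := by ring
  rw [h1, h2]
  generalize d * (d - 1) = t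
  generalize d * N = s
  omega

theorem pvCell_even (N i d : Int) (hi : 0 ≤ i) (hd : 0 ≤ d) (he : d % 2 = 0) :
    pvCell N i (i + d) = pvStart N d + 1 + i := by
  unfold pvCell pvStart
  rw [if_neg (by omega)]
  have h : i + d - i = d := by ring
  simp only [h, PySem.Int.mod_eq_emod_of_pos (show (0:Int) < 2 by omega)]
  rw [if_pos he]
  ring

theorem pvCell_odd (N i d : Int) (hd : 0 ≤ d) (ho : d % 2 = 1) :
    pvCell N i (i + d) = pvStart N d + N - d - i := by
  unfold pvCell pvStart
  rw [if_neg (by omega)]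
  have h : i + d - i = d := by ring
  simp only [h, PySem.Int.mod_eq_emod_of_pos (show (0:Int) < 2 by omega)]
  rw [if_neg (by omega)]

theorem pvCell_below (N i j : Int) (h : j < i) : pvCell N i j = 0 := by
  unfold pvCell
  rw [if_pos h]

theorem pvMat_congr (N : Int) (p q : Int → Int → Bool)
    (h : ∀ i j, 0 ≤ i → i < N → 0 ≤ j → j < N → p i j = q i j) :
    pvMat N p = pvMat N q := by
  unfold pvMat
  apply List.map_congr_left
  intro i hi
  rw [PySem.List.mem_pyRange_one] at hi
  apply List.map_congr_left
  intro j hj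
  rw [PySem.List.mem_pyRange_one] at hj
  rw [h i j hi.1 hi.2 hj.1 hj.2]

theorem set_map_pyRange {α : Type} (N : Int) (g : Int → α) (r : Int) (v : α)
    (h0 : 0 ≤ r) (hr : r < N) :
    PySem.List.pySetD ((PySem.List.pyRange 0 N 1).map g) r v
      = (PySem.List.pyRange 0 N 1).map (fun i => if i = r then v else g i) := by
  rw [PySem.List.pySetD_of_nonneg _ _ h0]
  apply List.ext_getElem
  · simp
  · intro k hk1 hk2
    simp only [List.getElem_set, List.getElem_map]
    have hlen : k < (PySem.List.pyRange 0 N 1).length := by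
      simpa using hk2
    rw [PySem.List.getElem_pyRange_one (h := hlen)]
    by_cases hkr : r.toNat = k
    · rw [if_pos hkr, if_pos (by omega)]
    · rw [if_neg hkr, if_neg (by omega)]

theorem pvGetD_pvMat (N : Int) (p : Int → Int → Bool) (r : Int) (h0 : 0 ≤ r) (hr : r < N) :
    PySem.List.pyGetD (pvMat N p) r []
      = (PySem.List.pyRange 0 N 1).map (fun j => if p r j then pvCell N r j else 0) := by
  unfold pvMat
  rw [PySem.List.pyGetD_map_pyRange_of_nonneg _ _ _ _ h0 (by simpa using hr)]

theorem pvSetCell_pvMat (N : Int) (p : Int → Int → Bool) (r c : Int)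
    (hr0 : 0 ≤ r) (hr : r < N) (hc0 : 0 ≤ c) (hc : c < N) :
    pvSetCell (pvMat N p) r c (pvCell N r c)
      = pvMat N (fun i j => p i j || (decide (i = r) && decide (j = c))) := by
  unfold pvSetCell
  rw [pvGetD_pvMat N p r hr0 hr]
  rw [set_map_pyRange N _ c _ hc0 hc]
  unfold pvMat
  rw [set_map_pyRange N _ r _ hr0 hr]
  apply List.map_congr_left
  intro i hi
  rw [PySem.List.mem_pyRange_one] at hi
  by_cases hir : i = r
  · subst hir
    rw [if_pos rfl]
    apply List.map_congr_left
    intro j hj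
    by_cases hjc : j = c
    · subst hjc
      simp
    · simp [hjc]
  · rw [if_neg hir]
    apply List.map_congr_left
    intro j hj
    simp [hir]

-- even inner loop: fills diagonal d top-down, rows t..N-d-1 remaining
theorem pv_inner_even (N d : Int) (hd : 0 ≤ d) (hdN : d < N) (he : d % 2 = 0) :
    ∀ k : Nat, ∀ t : Int, 0 ≤ t → t + k = N - d →
      (PySem.List.pyRange t (N - d) 1).foldl (pvA_even d d)
          (pvStart N d + 1 + t, pvMat N (fun i j => (decide (i ≤ j) && decide (j - i < d)) || (decide (j - i = d) && decide (i < t))))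
        = (pvStart N d + 1 + (N - d), pvMat N (fun i j => (decide (i ≤ j) && decide (j - i < d)) || (decide (j - i = d) && decide (i < N - d)))) := by
  intro k
  induction k with
  | zero =>
    intro t ht hk
    have hteq : t = N - d := by omega
    subst hteq
    rw [PySem.List.pyRange_one_eq_nil (by omega)]
    rfl
  | succ m ih =>
    intro t ht hk
    rw [PySem.List.pyRange_one_cons (by omega)]
    rw [List.foldl_cons]
    have hset : pvSetCell (pvMat N (fun i j => (decide (i ≤ j) && decide (j - i < d)) || (decide (j - i = d) && decide (i < t)))) t (t + d)
        (pvStart N d + 1 + t)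
        = pvMat N (fun i j => (decide (i ≤ j) && decide (j - i < d)) || (decide (j - i = d) && decide (i < t + 1))) := by
      have hv : pvStart N d + 1 + t = pvCell N t (t + d) :=
        (pvCell_even N t d ht hd he).symm
      rw [hv]
      rw [pvSetCell_pvMat N _ t (t + d) ht (by omega) (by omega) (by omega)]
      apply pvMat_congr
      intro i j hi0 hiN hj0 hjN
      simp only [← Bool.decide_and, ← Bool.decide_or, decide_eq_decide]
      omega
    have hstep : pvA_even d d
        (pvStart N d + 1 + t, pvMat N (fun i j => (decide (i ≤ j) && decide (j - i < d)) || (decide (j - i = d) && decide (i < t)))) t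
        = (pvStart N d + 1 + (t + 1), pvMat N (fun i j => (decide (i ≤ j) && decide (j - i < d)) || (decide (j - i = d) && decide (i < t + 1)))) := by
      unfold pvA_even
      by_cases hd0 : d = 0
      · subst hd0
        rw [if_pos rfl]
        have hset' := hset
        simp only [add_zero] at hset'
        rw [hset']
        congr 1
        omega
      · rw [if_neg hd0, if_pos (by omega)]
        rw [hset]
        congr 1
        omega
    rw [hstep]
    exact ih (t + 1) (by omega) (by omega)

-- odd inner loop: fills diagonal d bottom-up; the loop counter counts down from N-d
theorem pv_inner_odd (N d : Int) (hd : 0 ≤ d) (hdN : d < N) (ho : d % 2 = 1) :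
    ∀ k : Nat, (k : Int) ≤ N - d →
      (PySem.List.pyRange (k : Int) 0 (-1)).foldl (pvA_odd d)
          (pvStart N d + 1 + (N - d - k), pvMat N (fun i j => (decide (i ≤ j) && decide (j - i < d)) || (decide (j - i = d) && decide ((k : Int) ≤ i))))
        = (pvStart N d + 1 + (N - d), pvMat N (fun i j => (decide (i ≤ j) && decide (j - i < d)) || (decide (j - i = d) && decide ((0 : Int) ≤ i)))) := by
  intro k
  induction k with
  | zero =>
    intro hk
    rw [PySem.List.pyRange_neg_one_eq_nil (by omega)]
    simp
  | succ m ih =>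
    intro hk
    rw [PySem.List.pyRange_neg_one_cons (by push_cast; omega)]
    rw [List.foldl_cons]
    have hset : pvSetCell (pvMat N (fun i j => (decide (i ≤ j) && decide (j - i < d)) || (decide (j - i = d) && decide (((m + 1 : Nat) : Int) ≤ i)))) ((m : Int)) ((m : Int) + d)
        (pvStart N d + 1 + (N - d - ((m + 1 : Nat) : Int)))
        = pvMat N (fun i j => (decide (i ≤ j) && decide (j - i < d)) || (decide (j - i = d) && decide (((m : Nat) : Int) ≤ i))) := by
      have hv : pvStart N d + 1 + (N - d - ((m + 1 : Nat) : Int)) = pvCell N (m : Int) ((m : Int) + d) := by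
        rw [pvCell_odd N (m : Int) d hd ho]
        push_cast
        ring
      rw [hv]
      rw [pvSetCell_pvMat N _ (m : Int) ((m : Int) + d) (by positivity) (by push_cast at hk ⊢; omega) (by omega) (by push_cast at hk ⊢; omega)]
      apply pvMat_congr
      intro i j hi0 hiN hj0 hjN
      simp only [← Bool.decide_and, ← Bool.decide_or, decide_eq_decide]
      push_cast
      omega
    have hstep : pvA_odd d
        (pvStart N d + 1 + (N - d - ((m + 1 : Nat) : Int)), pvMat N (fun i j => (decide (i ≤ j) && decide (j - i < d)) || (decide (j - i = d) && decide (((m + 1 : Nat) : Int) ≤ i)))) ((m + 1 : Nat) : Int)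
        = (pvStart N d + 1 + (N - d - ((m : Nat) : Int)), pvMat N (fun i j => (decide (i ≤ j) && decide (j - i < d)) || (decide (j - i = d) && decide (((m : Nat) : Int) ≤ i)))) := by
      unfold pvA_odd
      have hrow : ((m + 1 : Nat) : Int) - 1 = (m : Int) := by push_cast; ring
      have hcol : ((m + 1 : Nat) : Int) + d - 1 = (m : Int) + d := by push_cast; ring
      rw [hrow, hcol, hset]
      congr 1
      push_cast
      ring
    rw [hstep]
    have hcast : ((m + 1 : Nat) : Int) - 1 = ((m : Nat) : Int) := by push_cast; ring
    rw [hcast]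
    exact ih (by push_cast at hk ⊢; omega)

-- outer loop over the diagonals
theorem pv_outer (N : Int) (hN : 0 < N) :
    ∀ k : Nat, ∀ d : Int, 0 ≤ d → d + k = N →
      (PySem.List.pyRange d N 1).foldl (pvA_outer N)
          (pvStart N d + 1, pvMat N (fun i j => decide (i ≤ j) && decide (j - i < d)), d)
        = (pvStart N N + 1, pvMat N (fun i j => decide (i ≤ j) && decide (j - i < N)), N) := by
  intro k
  induction k with
  | zero =>
    intro d hd hdk
    have hdN : d = N := by omega
    subst hdN
    rw [PySem.List.pyRange_one_eq_nil (by omega)]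
    rfl
  | succ m ih =>
    intro d hd hdk
    have hdN : d < N := by omega
    rw [PySem.List.pyRange_one_cons (by omega)]
    rw [List.foldl_cons]
    have hstep : pvA_outer N (pvStart N d + 1, pvMat N (fun i j => decide (i ≤ j) && decide (j - i < d)), d) d
        = (pvStart N (d + 1) + 1, pvMat N (fun i j => decide (i ≤ j) && decide (j - i < (d + 1))), d + 1) := by
      unfold pvA_outer
      simp only [PySem.Int.mod_eq_emod_of_pos (show (0:Int) < 2 by omega)]
      have hM0even : pvMat N (fun i j => decide (i ≤ j) && decide (j - i < d))
          = pvMat N (fun i j => (decide (i ≤ j) && decide (j - i < d)) || (decide (j - i = d) && decide (i < (0:Int)))) := by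
        apply pvMat_congr
        intro i j hi0 hiN hj0 hjN
        simp only [← Bool.decide_and, ← Bool.decide_or, decide_eq_decide]
        omega
      have hM0odd : pvMat N (fun i j => decide (i ≤ j) && decide (j - i < d))
          = pvMat N (fun i j => (decide (i ≤ j) && decide (j - i < d)) || (decide (j - i = d) && decide ((N - d) ≤ i))) := by
        apply pvMat_congr
        intro i j hi0 hiN hj0 hjN
        simp only [← Bool.decide_and, ← Bool.decide_or, decide_eq_decide]
        omega
      have hMfin : ∀ c : Int, c = N - d → pvMat N (fun i j => (decide (i ≤ j) && decide (j - i < d)) || (decide (j - i = d) && decide (i < c)))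
          = pvMat N (fun i j => decide (i ≤ j) && decide (j - i < (d + 1))) := by
        intro c hc
        apply pvMat_congr
        intro i j hi0 hiN hj0 hjN
        simp only [← Bool.decide_and, ← Bool.decide_or, decide_eq_decide]
        omega
      have hMfin0 : pvMat N (fun i j => (decide (i ≤ j) && decide (j - i < d)) || (decide (j - i = d) && decide ((0:Int) ≤ i)))
          = pvMat N (fun i j => decide (i ≤ j) && decide (j - i < (d + 1))) := by
        apply pvMat_congr
        intro i j hi0 hiN hj0 hjN
        simp only [← Bool.decide_and, ← Bool.decide_or, decide_eq_decide]
        omega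
      by_cases hpar : d % 2 = 0
      · rw [if_pos hpar]
        have h0 : pvStart N d + 1 = pvStart N d + 1 + 0 := by ring
        have heven := pv_inner_even N d hd hdN hpar (N - d).toNat 0 (by omega) (by omega)
        rw [hM0even, h0]
        rw [heven]
        rw [hMfin (N - d) rfl]
        rw [pvStart_succ N d hd]
        congr 1
        ring
      · have hodd1 : d % 2 = 1 := by omega
        rw [if_neg hpar]
        have hcast : (((N - d).toNat : Nat) : Int) = N - d := by omega
        have hodd := pv_inner_odd N d hd hdN hodd1 (N - d).toNat (by omega)
        rw [hcast] at hodd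
        have hz : N - d - (N - d) = 0 := by ring
        rw [hz, add_zero] at hodd
        rw [hM0odd]
        rw [hodd]
        rw [hMfin0]
        rw [pvStart_succ N d hd]
        congr 1
        ring
    rw [hstep]
    exact ih (d + 1) (by omega) (by omega)

theorem pvMat_top (N : Int) :
    pvMat N (fun i j => decide (i ≤ j) && decide (j - i < N)) = pattern6_alt N := by
  unfold pvMat pattern6_alt
  apply List.map_congr_left
  intro i hi
  rw [PySem.List.mem_pyRange_one] at hi
  apply List.map_congr_left
  intro j hj
  rw [PySem.List.mem_pyRange_one] at hj
  by_cases hij : i ≤ j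
  · rw [if_pos (by simp only [← Bool.decide_and, decide_eq_true_eq]; omega)]
  · rw [if_neg (by simp only [← Bool.decide_and, decide_eq_true_eq]; omega)]
    rw [pvCell_below N i j (by omega)]

theorem pvMat_zero (N : Int) :
    pvMat N (fun i j => decide (i ≤ j) && decide (j - i < (0:Int)))
      = (PySem.List.pyRange 0 N 1).map (fun _ => (PySem.List.pyRange 0 N 1).map (fun _ => (0 : Int))) := by
  unfold pvMat
  apply List.map_congr_left
  intro i _
  apply List.map_congr_left
  intro j _
  rw [if_neg (by simp only [← Bool.decide_and, decide_eq_true_eq]; omega)]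

-- ===== VERDICT (by name: the statement is the Claim_ definition above) =====
theorem pattern6_spec : Claim_equal_pattern6 := by
  unfold Claim_equal_pattern6 Spec_pattern6
  intro N _
  by_cases hN : N ≤ 0
  · unfold pattern6 pattern6_alt
    rw [PySem.List.pyRange_one_eq_nil (by omega)]
    rfl
  · have hN' : 0 < N := by omega
    unfold pattern6
    simp only []
    have h := pv_outer N hN' N.toNat 0 (by omega) (by omega)
    rw [pvStart_zero N] at h
    rw [← pvMat_zero N]
    simp only [zero_add] at h
    rw [h]
    exact pvMat_top N
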